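-- pv_equiv track=rewrite | github.com/RNABioInfo/mcaat | proof_of_concept/production_scripts/string_based_filter.py | shift_left_common_word_length
-- ===== SOURCE A (Python) =====
-- def shift_left_common_word_length(cycles_per_cluster):
--     if len(cycles_per_cluster) == 1:
--         return 0
--     k = 23
--     size = len(cycles_per_cluster[0])
--     count = 0
--     for cycle_length_index in range(size-k-1,k+1,-1):
--         for cycle_index in range(0, len(cycles_per_cluster)):
--             if cycles_per_cluster[0][cycle_length_index:] in cycles_per_cluster[cycle_index]:
--                 continue
--             else:
--                 return count+k
--         count+=1
--     return count+k
--
-- count = 0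
-- ===== SOURCE B (Python) =====
-- def shift_left_common_word_length(cycles_per_cluster):
--     # Binary search for the monotone success threshold over candidate suffixes
--     # (a longer suffix contained in every cluster implies every shorter one is).
--     if len(cycles_per_cluster) == 1:
--         return 0
--     k = 23
--     s = cycles_per_cluster[0]
--     size = len(s)
--     n = max(0, size - 2 * k - 2)  # number of candidate suffixes A would examine
--     lo, hi = 0, n
--     while lo < hi:
--         mid = (lo + hi) // 2
--         suf = s[size - k - 1 - mid:]
--         if all(suf in t for t in cycles_per_cluster):
--             lo = mid + 1
--         else:
--             hi = mid
--     return k + lo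
-- ===== Notes on version B (the rewrite author's own statement) =====
-- stated objective: alternative
-- what changed: A scans candidate suffixes one by one in descending start-index order until the first membership failure; B exploits that being contained in every cluster string is monotone in the suffix length and binary-searches for the failure threshold (O(log size) membership rounds in the worst case, though not measurably faster on random inputs where A exits at the first candidate).
import Mathlib
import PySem

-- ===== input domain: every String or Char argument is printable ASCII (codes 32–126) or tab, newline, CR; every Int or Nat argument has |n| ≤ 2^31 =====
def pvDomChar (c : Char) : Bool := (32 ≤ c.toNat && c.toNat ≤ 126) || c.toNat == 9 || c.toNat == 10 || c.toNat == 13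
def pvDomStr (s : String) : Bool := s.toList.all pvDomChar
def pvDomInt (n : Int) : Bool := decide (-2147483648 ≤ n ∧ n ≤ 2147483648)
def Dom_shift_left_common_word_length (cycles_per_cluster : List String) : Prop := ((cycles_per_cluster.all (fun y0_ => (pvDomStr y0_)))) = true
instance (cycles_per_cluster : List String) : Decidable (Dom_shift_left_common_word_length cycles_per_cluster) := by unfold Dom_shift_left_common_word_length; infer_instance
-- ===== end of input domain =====

-- B replaces A's linear scan over candidate suffixes by a binary search for the monotone
-- success threshold (containment of a suffix in all cluster strings is monotone in its length);
-- an alternative algorithm, not measured faster on the generated inputs.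

-- ===== PORT A =====
-- inner 'for cycle_index …: if suffix in cluster: continue else: return' = all clusters contain the suffix
def pvOkA (cpc : List String) (s : String) (i : Int) : Bool :=
  cpc.all (fun t => PySem.Str.isIn (PySem.Str.slice s (some i) none) t)

-- outer 'for cycle_length_index in range(size-k-1, k+1, -1)' with early return of count+k
def pvLoopA (cpc : List String) (s : String) (k : Int) : List Int → Int → Int
  | [], count => count + k
  | i :: rest, count =>
      if pvOkA cpc s i then pvLoopA cpc s k rest (count + 1) else count + k

def shift_left_common_word_length (cycles_per_cluster : List String) : Int :=
  if cycles_per_cluster.length == 1 then 0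
  else
    -- cycles_per_cluster[0]; the default is dead under Pre_ (Python raises IndexError on [])
    let s : String := cycles_per_cluster.headD ""
    let k : Int := 23
    let size : Int := PySem.Str.len s
    pvLoopA cycles_per_cluster s k (PySem.List.pyRange (size - k - 1) (k + 1) (-1)) 0

-- ===== PORT B =====
-- 'all(suf in t for t in cycles_per_cluster)' with suf = s[size-k-1-j:]
def pvOkB (cpc : List String) (s : String) (size j : Int) : Bool :=
  cpc.all (fun t => PySem.Str.isIn (PySem.Str.slice s (some (size - 23 - 1 - j)) none) t)

-- the 'while lo < hi' binary-search loop of Source B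
def pvBsearch (cpc : List String) (s : String) (size : Int) (lo hi : Int) : Int :=
  if h : lo < hi then
    let mid := PySem.Int.floordiv (lo + hi) 2
    if pvOkB cpc s size mid then pvBsearch cpc s size (mid + 1) hi
    else pvBsearch cpc s size lo mid
  else lo
termination_by (hi - lo).toNat
decreasing_by
  · have := PySem.Int.floordiv_two_mid_bounds (le_of_lt h)
    omega
  · have hf1 := (PySem.Int.floordiv_two_mid_bounds (le_of_lt h)).1
    have hd2 := (PySem.Int.floordiv_lt_iff_lt_mul (a := lo + hi) (b := 2) (q := hi) (by norm_num)).mpr (by omega)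
    omega

def shift_left_common_word_length_alt (cycles_per_cluster : List String) : Int :=
  if cycles_per_cluster.length == 1 then 0
  else
    -- cycles_per_cluster[0]; the default is dead under Pre_ (Source B raises IndexError on [] too)
    let s : String := cycles_per_cluster.headD ""
    let k : Int := 23
    let size : Int := PySem.Str.len s
    let n : Int := max 0 (size - 2 * k - 2)
    k + pvBsearch cycles_per_cluster s size 0 n

-- ===== PRECONDITION & SPEC =====
-- Pre_ excludes only the empty list, on which A raises IndexError (cycles_per_cluster[0]).
def Pre_shift_left_common_word_length (cycles_per_cluster : List String) : Prop :=
  cycles_per_cluster ≠ []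
instance (cycles_per_cluster : List String) : Decidable (Pre_shift_left_common_word_length cycles_per_cluster) := by unfold Pre_shift_left_common_word_length; infer_instance

def pvWitness_shift_left_common_word_length : List String := ["abcab", "bca"]

def Spec_shift_left_common_word_length (cycles_per_cluster : List String) (out : Int) : Prop := out = shift_left_common_word_length_alt cycles_per_cluster
instance (cycles_per_cluster : List String) (out : Int) : Decidable (Spec_shift_left_common_word_length cycles_per_cluster out) := by unfold Spec_shift_left_common_word_length; infer_instance

-- ===== CLAIM (what is proved, stated in full; the proofs are below) =====
def Claim_equal_shift_left_common_word_length : Prop := ∀ (cycles_per_cluster : List String), Dom_shift_left_common_word_length cycles_per_cluster → Pre_shift_left_common_word_length cycles_per_cluster → Spec_shift_left_common_word_length cycles_per_cluster (shift_left_common_word_length cycles_per_cluster)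

-- ===== LEMMAS AND PROOFS =====

-- one step of monotonicity: if the suffix starting one position earlier (longer) is contained
-- in every cluster, so is the shorter one
theorem pvOkB_mono_step (cpc : List String) (s : String) (size j : Int)
    (hran : j ≤ size - 25)
    (h : pvOkB cpc s size (j + 1) = true) : pvOkB cpc s size j = true := by
  unfold pvOkB at h ⊢
  rw [List.all_eq_true] at h ⊢
  intro t ht
  have h' := h t ht
  rw [PySem.Str.isIn_iff_infix] at h' ⊢
  rw [PySem.Str.toList_slice, PySem.Chars.slice_eq_listSlice] at h' ⊢
  rw [PySem.List.slice_from _ (by omega : (0:Int) ≤ size - 23 - 1 - j)]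
  rw [PySem.List.slice_from _ (by omega : (0:Int) ≤ size - 23 - 1 - (j + 1))] at h'
  have key : s.toList.drop (size - 23 - 1 - j).toNat
      = (s.toList.drop (size - 23 - 1 - (j + 1)).toNat).drop 1 := by
    rw [List.drop_drop]
    congr 1
    omega
  rw [key]
  exact List.IsInfix.trans (List.IsSuffix.isInfix (List.drop_suffix 1 _)) h'

theorem pvOkB_true_below (cpc : List String) (s : String) (size : Int)
    (m j : Int) (hj : 0 ≤ j) (hjm : j ≤ m) (hm : m < max 0 (size - 48))
    (h : pvOkB cpc s size m = true) : pvOkB cpc s size j = true := by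
  obtain ⟨d, rfl⟩ : ∃ d : Nat, m = j + d := ⟨(m - j).toNat, by omega⟩
  clear hjm
  induction d generalizing j with
  | zero => simpa using h
  | succ d ih =>
    have hstep : (j : Int) ≤ size - 25 := by omega
    refine pvOkB_mono_step cpc s size j hstep (ih (j + 1) (by omega) (by omega) ?_)
    have : (j + 1 : Int) + d = j + (d + 1 : Nat) := by push_cast; ring
    rw [this]; exact h

-- binary-search correctness: the loop returns the threshold between true and false
theorem pvBsearch_correct (cpc : List String) (s : String) (size n : Int)
    (hn : n ≤ max 0 (size - 48)) :
    ∀ (fuel : Nat) (lo hi : Int), (hi - lo).toNat = fuel → 0 ≤ lo → lo ≤ hi → hi ≤ n →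
    (∀ j, 0 ≤ j → j < lo → pvOkB cpc s size j = true) →
    (∀ j, hi ≤ j → j < n → pvOkB cpc s size j = false) →
    lo ≤ pvBsearch cpc s size lo hi ∧ pvBsearch cpc s size lo hi ≤ hi ∧
    (∀ j, 0 ≤ j → j < pvBsearch cpc s size lo hi → pvOkB cpc s size j = true) ∧
    (∀ j, pvBsearch cpc s size lo hi ≤ j → j < n → pvOkB cpc s size j = false) := by
  intro fuel
  induction fuel using Nat.strong_induction_on with
  | _ fuel ih =>
    intro lo hi hfuel hlo hlohi hhin Hlow Hhigh
    rw [pvBsearch]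
    by_cases h : lo < hi
    · simp only [h, dif_pos]
      have hmid := PySem.Int.floordiv_two_mid_bounds (le_of_lt h)
      have hmidlt : PySem.Int.floordiv (lo + hi) 2 < hi :=
        (PySem.Int.floordiv_lt_iff_lt_mul (b := 2) (by norm_num)).mpr (by omega)
      set mid := PySem.Int.floordiv (lo + hi) 2 with hmiddef
      by_cases hok : pvOkB cpc s size mid = true
      · simp only [hok, if_pos]
        have := ih (hi - (mid + 1)).toNat (by omega) (mid + 1) hi rfl (by omega) (by omega) hhin
          (fun j hj hjlt => pvOkB_true_below cpc s size mid j hj (by omega) (by omega) hok) Hhigh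
        exact ⟨by omega, this.2.1, this.2.2.1, this.2.2.2⟩
      · have hokf : pvOkB cpc s size mid = false := by simpa using hok
        simp only [hokf, Bool.false_eq_true, if_false]
        have Hhigh' : ∀ j, mid ≤ j → j < n → pvOkB cpc s size j = false := by
          intro j hjm hjn
          by_contra hc
          simp only [Bool.not_eq_false] at hc
          have := pvOkB_true_below cpc s size j mid (by omega) hjm (by omega) hc
          rw [this] at hokf; exact absurd hokf (by simp)
        have := ih (mid - lo).toNat (by omega) lo mid rfl hlo (by omega) (by omega) Hlow Hhigh'
        exact ⟨this.1, by omega, this.2.2.1, this.2.2.2⟩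
    · simp only [h, dif_neg, not_false_iff]
      have : lo = hi := by omega
      subst this
      exact ⟨le_refl _, le_refl _, Hlow, Hhigh⟩

-- A's loop adds k plus the length of the initial run of successful indices
theorem pvLoopA_run (cpc : List String) (s : String) (k : Int) (l : List Int) (c : Int) :
    pvLoopA cpc s k l c = c + k + ((l.takeWhile (pvOkA cpc s)).length : Int) := by
  induction l generalizing c with
  | nil =>
    show c + k = _
    simp
  | cons i rest ih =>
    unfold pvLoopA
    by_cases hok : pvOkA cpc s i = true
    · rw [if_pos hok, ih, List.takeWhile_cons_of_pos hok]
      simp only [List.length_cons]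
      push_cast
      ring
    · rw [if_neg hok, List.takeWhile_cons_of_neg hok]
      simp

-- length of takeWhile over range' when the predicate is an initial segment up to r
theorem takeWhile_range'_length (p : Nat → Bool) (r : Nat) :
    ∀ (c start : Nat), (∀ j, j < r → p j = true) → (∀ j, r ≤ j → j < start + c → p j = false) →
    ((List.range' start c).takeWhile p).length = min r (start + c) - start := by
  intro c
  induction c with
  | zero => intro start _ _; simp [List.range']
  | succ c ih =>
    intro start h1 h2
    rw [List.range'_succ]
    by_cases hp : p start = true
    · have hstart : start < r := by
        by_contra hc
        have := h2 start (by omega) (by omega)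
        rw [this] at hp; exact absurd hp (by simp)
      rw [List.takeWhile_cons_of_pos hp, List.length_cons,
        ih (start + 1) h1 (fun j hj hj2 => h2 j hj (by omega))]
      omega
    · have hr : r ≤ start := by
        by_contra hc
        exact hp (h1 start (by omega))
      rw [List.takeWhile_cons_of_neg hp]
      simp; omega

theorem takeWhile_range_length (p : Nat → Bool) (r m : Nat)
    (h1 : ∀ j, j < r → p j = true) (h2 : ∀ j, r ≤ j → j < m → p j = false) :
    ((List.range m).takeWhile p).length = min r m := by
  rw [List.range_eq_range', takeWhile_range'_length p r m 0 h1 (by simpa using h2)]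
  omega

-- ===== VERDICT (by name: the statement is the Claim_ definition above) =====
theorem shift_left_common_word_length_spec : Claim_equal_shift_left_common_word_length := by
  intro cpc _ hpre
  unfold Spec_shift_left_common_word_length
  unfold shift_left_common_word_length shift_left_common_word_length_alt
  by_cases hlen : cpc.length == 1
  · simp [hlen]
  · simp only [hlen, Bool.false_eq_true, if_false]
    set s : String := cpc.headD "" with hsdef
    set size : Int := PySem.Str.len s with hszdef
    set n : Int := max 0 (size - 2 * 23 - 2) with hndef
    have hn0 : 0 ≤ n := le_max_left _ _
    -- run the binary search and collect its threshold properties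
    have hbs := pvBsearch_correct cpc s size n (by omega) ((n - 0).toNat) 0 n rfl
      (le_refl 0) (by omega) (le_refl n)
      (by intro j hj hj0; omega) (by intro j hj hjn; omega)
    set r : Int := pvBsearch cpc s size 0 n with hrdef
    obtain ⟨hr0, hrn, Htrue, Hfalse⟩ := hbs
    -- rewrite A's countdown range as a mapped Nat range and A's loop as a takeWhile length
    rw [PySem.List.pyRange_neg_one, pvLoopA_run, List.takeWhile_map, List.length_map]
    have hmn : (size - 23 - 1 - (23 + 1)).toNat = n.toNat := by omega
    rw [hmn]
    have hcomp : ((pvOkA cpc s) ∘ (fun kk : Nat => size - 23 - 1 - (kk : Int)))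
        = fun kk : Nat => pvOkB cpc s size (kk : Int) := rfl
    rw [hcomp]
    rw [takeWhile_range_length _ r.toNat n.toNat
      (fun j hj => Htrue (j : Int) (by positivity) (by omega))
      (fun j hjr hjn => Hfalse (j : Int) (by omega) (by omega))]
    omega
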